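-- pv_equiv track=rewrite | github.com/poyhsiao/agent-skills | git-workflow-automation/scripts/generate_pr_description.py | categorize_commits
-- ===== SOURCE A (Python) =====
-- from typing import List, Dict
-- from collections import defaultdict
--
-- def categorize_commits(commits: List[Dict[str, str]]) -> Dict[str, List[str]]:
--     """
--     Categorize commits by type (feat, fix, docs, etc.).
--
--     Args:
--         commits: List of commit info dicts
--
--     Returns:
--         Dict mapping commit types to commit subjects
--     """
--     categories = defaultdict(list)
--
--     for commit in commits:
--         subject = commit['subject']
--
--         # Parse conventional commit format
--         if ':' in subject:
--             type_part = subject.split(':', 1)[0]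
--             # Remove scope if present
--             commit_type = type_part.split('(')[0].strip()
--             categories[commit_type].append(subject)
--         else:
--             categories['other'].append(subject)
--
--     return categories
-- ===== SOURCE B (Python) =====
-- from typing import List, Dict
-- from collections import defaultdict
--
--
-- def _commit_key(subject: str) -> str:
--     if ':' in subject:
--         return subject.split(':', 1)[0].split('(')[0].strip()
--     return 'other'
--
--
-- def categorize_commits(commits: List[Dict[str, str]]) -> Dict[str, List[str]]:
--     pairs = [(_commit_key(c['subject']), c['subject']) for c in commits]
--     keys = list(dict.fromkeys(k for k, _ in pairs))
--     return defaultdict(list, {k: [s for kk, s in pairs if kk == k] for k in keys})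
-- ===== Notes on version B (the rewrite author's own statement) =====
-- stated objective: alternative
-- what changed: A builds a defaultdict incrementally, appending each subject inside one loop; B first maps commits to (type, subject) pairs, dedups the types with dict.fromkeys, and builds the whole dict in one comprehension with a filter pass per distinct type.
import Mathlib
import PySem

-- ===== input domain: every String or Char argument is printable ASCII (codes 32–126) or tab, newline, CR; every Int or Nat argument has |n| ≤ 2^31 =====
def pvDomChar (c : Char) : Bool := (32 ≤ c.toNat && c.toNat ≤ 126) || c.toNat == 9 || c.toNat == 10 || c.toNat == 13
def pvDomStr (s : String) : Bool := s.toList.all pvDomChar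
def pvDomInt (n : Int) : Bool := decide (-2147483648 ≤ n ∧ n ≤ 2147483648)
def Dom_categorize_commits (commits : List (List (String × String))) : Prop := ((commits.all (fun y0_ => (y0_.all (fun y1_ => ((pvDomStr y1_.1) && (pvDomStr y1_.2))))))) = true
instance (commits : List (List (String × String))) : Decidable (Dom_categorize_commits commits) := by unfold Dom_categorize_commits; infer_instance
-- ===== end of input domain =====

-- B replaces A's incremental defaultdict-append loop by a map/dedup/filter group-by (same return value); objective: alternative decomposition, not speed.

-- ===== PORT A =====
-- literal transliteration of A: one fold over the commits, a defaultdict(list) grown by modify (append)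
def categorize_commits (commits : List (List (String × String))) : List (String × List String) :=
  (commits.foldl (fun (cats : PySem.Dict String (List String)) commit =>
      let subject := ((PySem.Dict.mk commit).get? "subject").getD ""   -- commit['subject']; Pre_ guarantees the key is present
      if PySem.Str.isIn ":" subject then
        let type_part := ((PySem.Str.splitMax? subject ":" 1).getD []).headD ""
        let commit_type := PySem.Str.strip (((PySem.Str.split? type_part "(").getD []).headD "")
        cats.modify commit_type [] (· ++ [subject])
      else
        cats.modify "other" [] (· ++ [subject]))
    PySem.Dict.empty).items

-- ===== PORT B =====
-- Source B's helper _commit_key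
def commitKey (subject : String) : String :=
  if PySem.Str.isIn ":" subject then
    PySem.Str.strip (((PySem.Str.split? (((PySem.Str.splitMax? subject ":" 1).getD []).headD "") "(").getD []).headD "")
  else "other"

-- literal transliteration of Source B: (key, subject) pairs, dict.fromkeys dedup, one comprehension per key
-- (the dict comprehension over the dedup'd — hence distinct — keys builds its items in exactly this order)
def categorize_commits_alt (commits : List (List (String × String))) : List (String × List String) :=
  let pairs := commits.map (fun c =>
    (commitKey (((PySem.Dict.mk c).get? "subject").getD ""), ((PySem.Dict.mk c).get? "subject").getD ""))
  let keys := PySem.List.dedup (pairs.map (·.1))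
  keys.map (fun k => (k, (pairs.filter (fun p => p.1 == k)).map (·.2)))

-- ===== PRECONDITION & SPEC =====
-- Pre_ excludes commits lacking a 'subject' key, on which A (and B) raise KeyError.
def Pre_categorize_commits (commits : List (List (String × String))) : Prop :=
  commits.all (fun c => (PySem.Dict.mk c).contains "subject") = true
instance (commits : List (List (String × String))) : Decidable (Pre_categorize_commits commits) := by unfold Pre_categorize_commits; infer_instance

def pvWitness_categorize_commits : (List (List (String × String))) :=
  [[("subject", "feat(ui): add button")], [("subject", "hello world")]]

def Spec_categorize_commits (commits : List (List (String × String))) (out : List (String × List String)) : Prop := out = categorize_commits_alt commits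
instance (commits : List (List (String × String))) (out : List (String × List String)) : Decidable (Spec_categorize_commits commits out) := by unfold Spec_categorize_commits; infer_instance

-- ===== CLAIM (what is proved, stated in full; the proofs are below) =====
def Claim_equal_categorize_commits : Prop := ∀ (commits : List (List (String × String))), Dom_categorize_commits commits → Pre_categorize_commits commits → Spec_categorize_commits commits (categorize_commits commits)

-- ===== LEMMAS AND PROOFS =====

-- A's loop body, written with Source B's key helper
theorem bodyA_eq (d : PySem.Dict String (List String)) (c : List (String × String)) :
    (let subject := ((PySem.Dict.mk c).get? "subject").getD ""
     if PySem.Str.isIn ":" subject then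
       let type_part := ((PySem.Str.splitMax? subject ":" 1).getD []).headD ""
       let commit_type := PySem.Str.strip (((PySem.Str.split? type_part "(").getD []).headD "")
       d.modify commit_type [] (· ++ [subject])
     else
       d.modify "other" [] (· ++ [subject]))
    = d.modify (commitKey (((PySem.Dict.mk c).get? "subject").getD "")) [] (· ++ [((PySem.Dict.mk c).get? "subject").getD ""]) := by
  simp only [commitKey]
  split_ifs <;> rfl

-- ===== VERDICT (by name: the statement is the Claim_ definition above) =====
theorem categorize_commits_spec : Claim_equal_categorize_commits := by
  intro commits _ _
  unfold Spec_categorize_commits categorize_commits categorize_commits_alt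
  set g : List (String × String) → String × String := fun c =>
    (commitKey (((PySem.Dict.mk c).get? "subject").getD ""), ((PySem.Dict.mk c).get? "subject").getD "") with hg
  have h1 : commits.foldl (fun (cats : PySem.Dict String (List String)) commit =>
      let subject := ((PySem.Dict.mk commit).get? "subject").getD ""
      if PySem.Str.isIn ":" subject then
        let type_part := ((PySem.Str.splitMax? subject ":" 1).getD []).headD ""
        let commit_type := PySem.Str.strip (((PySem.Str.split? type_part "(").getD []).headD "")
        cats.modify commit_type [] (· ++ [subject])
      else
        cats.modify "other" [] (· ++ [subject])) PySem.Dict.empty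
      = (commits.map g).foldl (fun d p => d.modify p.1 [] (· ++ [p.2])) PySem.Dict.empty := by
    rw [List.foldl_map]
    apply PySem.List.foldl_congr_mem
    intro d c _
    exact bodyA_eq d c
  rw [h1]
  set pairs := commits.map g with hp
  have hnodup : ((pairs.foldl (fun d p => d.modify p.1 [] (· ++ [p.2])) PySem.Dict.empty)).keys.Nodup :=
    PySem.Dict.nodup_keys_foldl_modify_key pairs Prod.fst [] (fun _ p => (· ++ [p.2])) PySem.Dict.empty
      PySem.Dict.nodup_keys_empty
  rw [PySem.Dict.items_eq_map_keys _ hnodup []]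
  have hkeys : ((pairs.foldl (fun d p => d.modify p.1 [] (· ++ [p.2])) PySem.Dict.empty)).keys
      = PySem.List.dedup (pairs.map (·.1)) := by
    rw [PySem.Dict.keys_foldl_modify_key pairs Prod.fst [] (fun _ p => (· ++ [p.2])) PySem.Dict.empty,
        PySem.List.dedup_eq_ofList]
    rfl
  rw [hkeys]
  refine List.map_congr_left (fun k _ => ?_)
  rw [PySem.Dict.getD_foldl_modify_append]
  simp
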